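-- pv_equiv track=rewrite | github.com/omer-musai/random-shit | chessRiddle.py | findTile
-- ===== SOURCE A (Python) =====
-- def findTile(parities_to_flip):
--     board = [[i + (8*j) for i in range(8)] for j in range(8)]
--     rows = set([i for i in range(8)])
--     columns = set([i for i in range(8)])
--
--     for index, parity in enumerate(parities_to_flip):
--         if parity == 1:
--             if index == 0:
--                 rows = rows.intersection({1, 3, 5, 7})
--             if index == 1:
--                 rows = rows.intersection({2, 3, 6, 7})
--             if index == 2:
--                 rows = rows.intersection({4, 5, 6, 7})
--             if index == 3:
--                 columns = columns.intersection({1, 2, 5, 7})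
--             if index == 4:
--                 columns = columns.intersection({2, 3, 6, 7})
--             if index == 5:
--                 columns = columns.intersection({4, 5, 6, 7})
--     rows = list(rows)
--     columns = list(columns)
--     return board[rows[0]][columns[0]]
-- ===== SOURCE B (Python) =====
-- def findTile(parities_to_flip):
--     row = 0
--     col = 0
--     for index, parity in enumerate(parities_to_flip):
--         if parity == 1:
--             if index < 3:
--                 row |= 1 << index
--             elif index < 6:
--                 col |= 1 << (index - 3)
--     return col + 8 * row
-- ===== Notes on version B (the rewrite author's own statement) =====
-- stated objective: simpler
-- what changed: Drops the 8x8 board list and the two shrinking sets: one pass OR-ing each parity bit directly into a row/column binary number, returning col + 8*row.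
-- intended difference: On inputs whose parity list has 1 at indices 3 and 4 but not at index 5, A intersects columns with the mistyped set {1,2,5,7} (instead of the bit-0 set {1,3,5,7}) and returns column 2 (tile 8*row+2), while B returns the intended column 3 (tile 8*row+3), the number whose binary bits are the given parities. — e.g. on findTile([0, 0, 0, 1, 1]): A returns 2, B returns 3
import Mathlib
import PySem

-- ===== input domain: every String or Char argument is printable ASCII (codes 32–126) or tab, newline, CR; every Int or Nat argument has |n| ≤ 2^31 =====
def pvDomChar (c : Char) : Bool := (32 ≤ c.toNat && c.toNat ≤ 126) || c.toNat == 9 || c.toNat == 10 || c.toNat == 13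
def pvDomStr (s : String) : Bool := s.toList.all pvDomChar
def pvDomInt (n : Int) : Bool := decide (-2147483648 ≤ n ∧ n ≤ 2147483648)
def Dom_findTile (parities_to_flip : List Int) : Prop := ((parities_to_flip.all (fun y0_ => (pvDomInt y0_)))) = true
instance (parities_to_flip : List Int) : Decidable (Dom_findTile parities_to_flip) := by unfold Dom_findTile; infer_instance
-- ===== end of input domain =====

-- B replaces A's 8x8 board list and two shrinking sets by one pass that ORs each parity bit
-- into row/column binary numbers (simpler); on inputs with parity 1 at indices 3 and 4 but not 5,
-- A's mistyped column set {1,2,5,7} makes A return column 2 where B returns the intended column 3 (see D_).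

-- ===== PORT A =====
-- loop body of A (the sequential `if parity == 1: if index == k: …` chain, reassignments as lets)
def stepA (st : PySem.Set Int × PySem.Set Int) (ip : Int × Int) : PySem.Set Int × PySem.Set Int :=
  if ip.2 == 1 then
    let rows := if ip.1 == 0 then PySem.Set.inter st.1 (PySem.Set.ofList [1, 3, 5, 7]) else st.1
    let rows := if ip.1 == 1 then PySem.Set.inter rows (PySem.Set.ofList [2, 3, 6, 7]) else rows
    let rows := if ip.1 == 2 then PySem.Set.inter rows (PySem.Set.ofList [4, 5, 6, 7]) else rows
    let columns := if ip.1 == 3 then PySem.Set.inter st.2 (PySem.Set.ofList [1, 2, 5, 7]) else st.2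
    let columns := if ip.1 == 4 then PySem.Set.inter columns (PySem.Set.ofList [2, 3, 6, 7]) else columns
    let columns := if ip.1 == 5 then PySem.Set.inter columns (PySem.Set.ofList [4, 5, 6, 7]) else columns
    (rows, columns)
  else st

def findTile (parities_to_flip : List Int) : Int :=
  let board : List (List Int) :=
    (PySem.List.pyRange 0 8 1).map (fun j => (PySem.List.pyRange 0 8 1).map (fun i => i + 8 * j))
  let init : PySem.Set Int × PySem.Set Int :=
    (PySem.Set.ofList (PySem.List.pyRange 0 8 1), PySem.Set.ofList (PySem.List.pyRange 0 8 1))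
  let st := (PySem.List.enumerate parities_to_flip 0).foldl stepA init
  -- list(rows)[0] / list(columns)[0]: exact here — the sets are subsets of {0,…,7} kept in
  -- increasing order, which is exactly CPython's iteration order for these small-int sets
  -- (hash slot = value in an 8-slot table), so list(s)[0] is the head of our ordered list.
  -- Both sets always contain 7, so the `none` fallbacks are unreachable.
  match PySem.List.pyGet? st.1 0, PySem.List.pyGet? st.2 0 with
  | some r, some c =>
    match PySem.List.pyGet? board r with
    | some rowlist => (PySem.List.pyGet? rowlist c).getD 0
    | none => 0
  | _, _ => 0

-- ===== PORT B =====
-- loop body of B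
def stepB (st : Int × Int) (ip : Int × Int) : Int × Int :=
  if ip.2 == 1 then
    if ip.1 < 3 then (PySem.Int.bor st.1 ((1 : Int) <<< ip.1.toNat), st.2)
    else if ip.1 < 6 then (st.1, PySem.Int.bor st.2 ((1 : Int) <<< (ip.1 - 3).toNat))
    else st
  else st

def findTile_alt (parities_to_flip : List Int) : Int :=
  let st := (PySem.List.enumerate parities_to_flip 0).foldl stepB (0, 0)
  st.2 + 8 * st.1

-- ===== PRECONDITION & SPEC =====
-- On inputs whose parity list has 1 at indices 3 and 4 but not at index 5, A intersects columns
-- with the mistyped set {1,2,5,7} (instead of the bit-0 set {1,3,5,7}) and returns column 2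
-- (tile 8*row+2), while B returns the intended column 3 (tile 8*row+3), the number whose binary
-- bits are the given parities.
def D_findTile (parities_to_flip : List Int) : Prop :=
  parities_to_flip[3]? = some 1 ∧ parities_to_flip[4]? = some 1 ∧ parities_to_flip[5]? ≠ some 1
instance (parities_to_flip : List Int) : Decidable (D_findTile parities_to_flip) := by
  unfold D_findTile; infer_instance

def Spec_findTile (parities_to_flip : List Int) (out : Int) : Prop :=
  ¬ D_findTile parities_to_flip → out = findTile_alt parities_to_flip
instance (parities_to_flip : List Int) (out : Int) : Decidable (Spec_findTile parities_to_flip out) := by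
  unfold Spec_findTile; infer_instance

def pvDiffWitness_findTile : List Int := [0, 0, 0, 1, 1]
def pvDiffWitnessOut_findTile : Int × Int := (2, 3)

-- ===== CLAIM (what is proved, stated in full; the proofs are below) =====
def Claim_unchanged_findTile : Prop := ∀ (parities_to_flip : List Int), Dom_findTile parities_to_flip → Spec_findTile parities_to_flip (findTile parities_to_flip)
def Claim_changed_findTile : Prop := Dom_findTile (pvDiffWitness_findTile) ∧ D_findTile (pvDiffWitness_findTile) ∧ findTile (pvDiffWitness_findTile) = pvDiffWitnessOut_findTile.1 ∧ findTile_alt (pvDiffWitness_findTile) = pvDiffWitnessOut_findTile.2 ∧ pvDiffWitnessOut_findTile.1 ≠ pvDiffWitnessOut_findTile.2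
def Claim_exact_findTile : Prop := ∀ (parities_to_flip : List Int), Dom_findTile parities_to_flip → D_findTile parities_to_flip → findTile parities_to_flip ≠ findTile_alt parities_to_flip

-- ===== LEMMAS AND PROOFS =====

-- only the first six list entries matter: normalise to exactly six entries, padding with parity 0
def norm6 (l : List Int) : List Int := l.take 6 ++ List.replicate (6 - l.length) 0

-- each entry matters only through the test `parity == 1`
def pvBit (x : Int) : Int := if x = 1 then 1 else 0

theorem foldA_high : ∀ (l : List Int) (s : Int), 6 ≤ s → ∀ st,
    (PySem.List.enumerate l s).foldl stepA st = st := by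
  intro l
  induction l with
  | nil => intro s _ st; simp [PySem.List.enumerate_nil]
  | cons x xs ih =>
    intro s hs st
    rw [PySem.List.enumerate_cons, List.foldl_cons]
    have hstep : stepA st (s, x) = st := by
      have h0 : ¬ s = 0 := by omega
      have h1 : ¬ s = 1 := by omega
      have h2 : ¬ s = 2 := by omega
      have h3 : ¬ s = 3 := by omega
      have h4 : ¬ s = 4 := by omega
      have h5 : ¬ s = 5 := by omega
      simp [stepA, h0, h1, h2, h3, h4, h5]
    rw [hstep]
    exact ih (s + 1) (by omega) st

theorem foldB_high : ∀ (l : List Int) (s : Int), 6 ≤ s → ∀ st,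
    (PySem.List.enumerate l s).foldl stepB st = st := by
  intro l
  induction l with
  | nil => intro s _ st; simp [PySem.List.enumerate_nil]
  | cons x xs ih =>
    intro s hs st
    rw [PySem.List.enumerate_cons, List.foldl_cons]
    have hstep : stepB st (s, x) = st := by
      have h3 : ¬ s < 3 := by omega
      have h6 : ¬ s < 6 := by omega
      simp [stepB, h3, h6]
    rw [hstep]
    exact ih (s + 1) (by omega) st

theorem foldA_pad : ∀ (n : Nat) (s : Int) st,
    (PySem.List.enumerate (List.replicate n (0 : Int)) s).foldl stepA st = st := by
  intro n
  induction n with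
  | zero => intro s st; simp [PySem.List.enumerate_nil]
  | succ k ih =>
    intro s st
    rw [List.replicate_succ, PySem.List.enumerate_cons, List.foldl_cons]
    have hstep : stepA st (s, 0) = st := by simp [stepA]
    rw [hstep]; exact ih (s + 1) st

theorem foldB_pad : ∀ (n : Nat) (s : Int) st,
    (PySem.List.enumerate (List.replicate n (0 : Int)) s).foldl stepB st = st := by
  intro n
  induction n with
  | zero => intro s st; simp [PySem.List.enumerate_nil]
  | succ k ih =>
    intro s st
    rw [List.replicate_succ, PySem.List.enumerate_cons, List.foldl_cons]
    have hstep : stepB st (s, 0) = st := by simp [stepB]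
    rw [hstep]; exact ih (s + 1) st

theorem foldA_norm6 (l : List Int) (st : PySem.Set Int × PySem.Set Int) :
    (PySem.List.enumerate l 0).foldl stepA st = (PySem.List.enumerate (norm6 l) 0).foldl stepA st := by
  by_cases hlen : l.length ≤ 6
  · rw [norm6, List.take_of_length_le hlen, PySem.List.enumerate_append, List.foldl_append, foldA_pad]
  · have h6 : 6 - l.length = 0 := by omega
    rw [norm6, h6, List.replicate_zero, List.append_nil]
    conv_lhs => rw [← List.take_append_drop 6 l]
    rw [PySem.List.enumerate_append, List.foldl_append,
        foldA_high (l.drop 6) _ (by simp [List.length_take]; omega)]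

theorem foldB_norm6 (l : List Int) (st : Int × Int) :
    (PySem.List.enumerate l 0).foldl stepB st = (PySem.List.enumerate (norm6 l) 0).foldl stepB st := by
  by_cases hlen : l.length ≤ 6
  · rw [norm6, List.take_of_length_le hlen, PySem.List.enumerate_append, List.foldl_append, foldB_pad]
  · have h6 : 6 - l.length = 0 := by omega
    rw [norm6, h6, List.replicate_zero, List.append_nil]
    conv_lhs => rw [← List.take_append_drop 6 l]
    rw [PySem.List.enumerate_append, List.foldl_append,
        foldB_high (l.drop 6) _ (by simp [List.length_take]; omega)]

theorem findTile_norm6 (l : List Int) : findTile l = findTile (norm6 l) := by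
  simp only [findTile]
  rw [foldA_norm6]

theorem findTile_alt_norm6 (l : List Int) : findTile_alt l = findTile_alt (norm6 l) := by
  simp only [findTile_alt]
  rw [foldB_norm6]

theorem length_norm6 (l : List Int) : (norm6 l).length = 6 := by
  simp [norm6]; omega

theorem getElem?_norm6_one (l : List Int) (i : Nat) (hi : i < 6) :
    (norm6 l)[i]? = some 1 ↔ l[i]? = some 1 := by
  by_cases h : i < l.length
  · have ht : i < (l.take 6).length := by simp [List.length_take]; omega
    rw [norm6, List.getElem?_append_left ht]
    simp [hi]
  · have h1 : l[i]? = none := List.getElem?_eq_none (by omega)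
    have ht : (l.take 6).length ≤ i := by simp [List.length_take]; omega
    rw [norm6, List.getElem?_append_right ht, h1]
    simp [List.getElem?_replicate]

theorem stepA_bit (st : PySem.Set Int × PySem.Set Int) (i x : Int) :
    stepA st (i, x) = stepA st (i, pvBit x) := by
  by_cases hx : x = 1 <;> simp [stepA, pvBit, hx]

theorem stepB_bit (st : Int × Int) (i x : Int) :
    stepB st (i, x) = stepB st (i, pvBit x) := by
  by_cases hx : x = 1 <;> simp [stepB, pvBit, hx]

theorem foldA_map_bit : ∀ (l : List Int) (s : Int) st,
    (PySem.List.enumerate l s).foldl stepA st = (PySem.List.enumerate (l.map pvBit) s).foldl stepA st := by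
  intro l
  induction l with
  | nil => intro s st; rfl
  | cons x xs ih =>
    intro s st
    rw [List.map_cons, PySem.List.enumerate_cons, PySem.List.enumerate_cons,
        List.foldl_cons, List.foldl_cons, ← stepA_bit]
    exact ih (s + 1) _

theorem foldB_map_bit : ∀ (l : List Int) (s : Int) st,
    (PySem.List.enumerate l s).foldl stepB st = (PySem.List.enumerate (l.map pvBit) s).foldl stepB st := by
  intro l
  induction l with
  | nil => intro s st; rfl
  | cons x xs ih =>
    intro s st
    rw [List.map_cons, PySem.List.enumerate_cons, PySem.List.enumerate_cons,
        List.foldl_cons, List.foldl_cons, ← stepB_bit]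
    exact ih (s + 1) _

theorem findTile_map_bit (l : List Int) : findTile l = findTile (l.map pvBit) := by
  simp only [findTile]
  rw [foldA_map_bit]

theorem findTile_alt_map_bit (l : List Int) : findTile_alt l = findTile_alt (l.map pvBit) := by
  simp only [findTile_alt]
  rw [foldB_map_bit]

theorem core6 (a b c d e f : Int) (h : ¬ (d = 1 ∧ e = 1 ∧ f ≠ 1)) :
    findTile [a, b, c, d, e, f] = findTile_alt [a, b, c, d, e, f] := by
  by_cases ha : a = 1 <;> by_cases hb : b = 1 <;> by_cases hc : c = 1 <;>
    by_cases hd : d = 1 <;> by_cases he : e = 1 <;> by_cases hf : f = 1 <;>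
    first
      | exact absurd (show d = 1 ∧ e = 1 ∧ f ≠ 1 from ⟨hd, he, hf⟩) h
      | (rw [findTile_map_bit, findTile_alt_map_bit]
         simp only [List.map_cons, List.map_nil, pvBit, ha, hb, hc, hd, he, hf, if_true, if_false]
         decide)

theorem core6_ne (a b c d e f : Int) (hd : d = 1) (he : e = 1) (hf : f ≠ 1) :
    findTile [a, b, c, d, e, f] ≠ findTile_alt [a, b, c, d, e, f] := by
  by_cases ha : a = 1 <;> by_cases hb : b = 1 <;> by_cases hc : c = 1 <;>
    (rw [findTile_map_bit, findTile_alt_map_bit]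
     simp only [List.map_cons, List.map_nil, pvBit, ha, hb, hc, hd, he, hf, if_true, if_false]
     decide)

theorem exists_six (l : List Int) (h : l.length = 6) :
    ∃ a b c d e f, l = [a, b, c, d, e, f] := by
  match l, h with
  | [a, b, c, d, e, f], _ => exact ⟨a, b, c, d, e, f, rfl⟩

theorem D_iff_norm6 (l : List Int) (a b c d e f : Int) (hn : norm6 l = [a, b, c, d, e, f]) :
    D_findTile l ↔ (d = 1 ∧ e = 1 ∧ f ≠ 1) := by
  have h3 := getElem?_norm6_one l 3 (by omega)
  have h4 := getElem?_norm6_one l 4 (by omega)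
  have h5 := getElem?_norm6_one l 5 (by omega)
  rw [hn] at h3 h4 h5
  simp only [List.getElem?_cons_succ, List.getElem?_cons_zero, Option.some.injEq] at h3 h4 h5
  unfold D_findTile
  rw [← h3, ← h4]
  constructor
  · rintro ⟨x3, x4, x5⟩
    exact ⟨x3, x4, fun hf => x5 (h5.mp hf)⟩
  · rintro ⟨x3, x4, x5⟩
    exact ⟨x3, x4, fun hf => x5 (h5.mpr hf)⟩

-- ===== VERDICT (by name: the statement is the Claim_ definition above) =====
theorem findTile_spec : Claim_unchanged_findTile := by
  intro l _ hD
  rw [findTile_norm6, findTile_alt_norm6]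
  obtain ⟨a, b, c, d, e, f, hn⟩ := exists_six (norm6 l) (length_norm6 l)
  rw [hn]
  exact core6 a b c d e f (fun hx => hD ((D_iff_norm6 l a b c d e f hn).mpr hx))

theorem findTile_changed : Claim_changed_findTile := by unfold Claim_changed_findTile; decide

theorem findTile_tight : Claim_exact_findTile := by
  intro l _ hD
  rw [findTile_norm6, findTile_alt_norm6]
  obtain ⟨a, b, c, d, e, f, hn⟩ := exists_six (norm6 l) (length_norm6 l)
  rw [hn]
  obtain ⟨x3, x4, x5⟩ := (D_iff_norm6 l a b c d e f hn).mp hD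
  exact core6_ne a b c d e f x3 x4 x5
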